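-- pv_equiv track=rewrite | github.com/teimurjan/codility-solutions | lesson_90/longest_password.py | solution
-- ===== SOURCE A (Python) =====
-- def solution(s):
--     """
--     Args:
--         s (str): String of passwords
--
--     Returns:
--         int: length of the longest valid password
--     """
--     valid_chars = {
--         'a', 'b', 'c', 'd', 'e', 'f', 'g', 'h', 'i', 'j', 'k', 'l', 'm',
--         'n', 'o', 'p', 'q', 'r', 's', 't', 'u', 'v', 'w', 'x', 'y', 'z',
--
--         'A', 'B', 'C', 'D', 'E', 'F', 'G', 'H', 'I', 'J', 'K', 'L', 'M',
--         'N', 'O', 'P', 'Q', 'R', 'S', 'T', 'U', 'V', 'W', 'X', 'Y', 'Z',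
--     }
--
--     digits = {
--         '0', '1', '2', '3', '4', '5', '6', '7', '8', '9',
--     }
--
--     digits_count, chars_count, is_valid = 0, 0, True
--     longest_pass_length = -1
--
--     for i in s:
--         if i == ' ':
--             if digits_count % 2 != 0 and chars_count % 2 == 0 and is_valid:
--                 longest_pass_length = max(longest_pass_length, digits_count + chars_count)
--             digits_count, chars_count, is_valid = 0, 0, True
--         elif is_valid:
--             if i in valid_chars:
--                 chars_count += 1
--             elif i in digits:
--                 digits_count += 1
--             else:
--                 is_valid = False
--
--     if digits_count % 2 != 0 and chars_count % 2 == 0 and is_valid: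
--         longest_pass_length = max(longest_pass_length, digits_count + chars_count)
--
--     return longest_pass_length
-- ===== SOURCE B (Python) =====
-- LETTERS = frozenset('abcdefghijklmnopqrstuvwxyzABCDEFGHIJKLMNOPQRSTUVWXYZ')
-- DIGITS = frozenset('0123456789')
--
-- def solution(s):
--     best = -1
--     for token in s.split(' '):
--         d = sum(1 for ch in token if ch in DIGITS)
--         c = sum(1 for ch in token if ch in LETTERS)
--         if d + c == len(token) and d % 2 == 1 and c % 2 == 0:
--             best = max(best, d + c)
--     return best
-- ===== Notes on version B (the rewrite author's own statement) =====
-- stated objective: simpler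
-- what changed: Replaces A's single stateful character scan (running digit/letter counters, a validity flag and inline reset-on-space logic) by a two-phase decomposition: split the string at each single space character into tokens, then for each token count digits and letters and accept it when every character is counted, the digit count is odd and the letter count is even.
import Mathlib
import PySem

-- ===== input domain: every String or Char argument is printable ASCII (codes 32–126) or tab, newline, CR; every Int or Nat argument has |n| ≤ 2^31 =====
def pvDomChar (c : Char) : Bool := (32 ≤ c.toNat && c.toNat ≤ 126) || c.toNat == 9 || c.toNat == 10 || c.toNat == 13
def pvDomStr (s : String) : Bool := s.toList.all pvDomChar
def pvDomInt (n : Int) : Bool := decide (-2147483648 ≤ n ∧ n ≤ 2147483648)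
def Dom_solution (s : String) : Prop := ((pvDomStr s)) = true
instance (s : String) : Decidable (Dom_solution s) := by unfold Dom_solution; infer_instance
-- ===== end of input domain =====

-- B replaces A's single stateful character scan (running counters + validity flag,
-- reset at each space) by a plainer two-phase decomposition: split at spaces into
-- tokens, then count digits/letters per token; same O(n) cost.

-- ===== PORT A =====
-- the two Python set literals of A
def lettersA : PySem.Set Char :=
  PySem.Set.ofList "abcdefghijklmnopqrstuvwxyzABCDEFGHIJKLMNOPQRSTUVWXYZ".toList
def digitsA : PySem.Set Char := PySem.Set.ofList "0123456789".toList

-- the 'elif is_valid:' branch of A's loop body (state: digits_count, chars_count, is_valid)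
def chkA (st : Int × Int × Bool) (i : Char) : Int × Int × Bool :=
  if st.2.2 then
    (if i ∈ lettersA then (st.1, st.2.1 + 1, st.2.2)
     else if i ∈ digitsA then (st.1 + 1, st.2.1, st.2.2)
     else (st.1, st.2.1, false))
  else st

-- A's 'longest_pass_length' update (performed at a space and once after the loop)
def checkA (st : Int × Int × Bool) (b : Int) : Int :=
  if st.1 % 2 ≠ 0 ∧ st.2.1 % 2 = 0 ∧ st.2.2 = true then max b (st.1 + st.2.1) else b

-- A's loop body
def stepA (st : (Int × Int × Bool) × Int) (i : Char) : (Int × Int × Bool) × Int :=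
  if i = ' ' then ((0, 0, true), checkA st.1 st.2) else (chkA st.1 i, st.2)

def solution (s : String) : Int :=
  let r := s.toList.foldl stepA ((0, 0, true), -1)
  checkA r.1 r.2

-- ===== PORT B =====
-- per-token body of B's loop: count digits and letters, accept iff every character
-- is counted, the digit count is odd and the letter count is even
def stepB (best : Int) (t : List Char) : Int :=
  let d : Int := t.countP (· ∈ digitsA)
  let c : Int := t.countP (· ∈ lettersA)
  if d + c = (t.length : Int) ∧ d % 2 = 1 ∧ c % 2 = 0 then max best (d + c) else best

def solution_alt (s : String) : Int :=
  (PySem.Chars.splitOn s.toList " ".toList).foldl stepB (-1)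

-- ===== PRECONDITION & SPEC =====
def Spec_solution (s : String) (out : Int) : Prop := out = solution_alt s
instance (s : String) (out : Int) : Decidable (Spec_solution s out) := by unfold Spec_solution; infer_instance

-- ===== CLAIM (what is proved, stated in full; the proofs are below) =====
def Claim_equal_solution : Prop := ∀ (s : String), Dom_solution s → Spec_solution s (solution s)

-- ===== LEMMAS AND PROOFS =====

-- recursive characterisation of splitting on a single space
def splitSp : List Char → List (List Char)
  | [] => [[]]
  | c :: cs =>
    if c = ' ' then [] :: splitSp cs
    else
      match splitSp cs with
      | [] => [[c]]
      | t :: ts => (c :: t) :: ts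

-- A's scan of one token, starting from state st
def scanTok (st : Int × Int × Bool) (t : List Char) : Int × Int × Bool := t.foldl chkA st

-- A's per-token contribution to the best value
def gA (b : Int) (t : List Char) : Int := checkA (scanTok (0, 0, true) t) b

lemma splitSp_ne_nil (cs : List Char) : splitSp cs ≠ [] := by
  cases cs with
  | nil => simp [splitSp]
  | cons c cs =>
    simp only [splitSp]
    split
    · simp
    · split <;> simp

lemma splitSp_cons_headI_tail (cs : List Char) :
    splitSp cs = (splitSp cs).headI :: (splitSp cs).tail := by
  cases h : splitSp cs with
  | nil => exact absurd h (splitSp_ne_nil cs)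
  | cons t ts => simp

lemma go_spec (fuel : Nat) : ∀ (l cur : List Char) (accL : List (List Char)), l.length ≤ fuel →
    PySem.Chars.splitOn.go [' '] fuel l cur accL =
      accL.reverse ++ ((cur.reverse ++ (splitSp l).headI) :: (splitSp l).tail) := by
  induction fuel with
  | zero =>
    intro l cur accL h
    have : l = [] := List.eq_nil_of_length_eq_zero (Nat.le_zero.mp h)
    subst this
    simp [PySem.Chars.splitOn.go, splitSp]
  | succ fuel ih =>
    intro l cur accL h
    cases l with
    | nil => simp [PySem.Chars.splitOn.go, splitSp]
    | cons c rest =>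
      by_cases hc : c = ' '
      · subst hc
        rw [show PySem.Chars.splitOn.go [' '] (fuel+1) (' '::rest) cur accL
              = PySem.Chars.splitOn.go [' '] fuel rest [] (cur.reverse :: accL) by
            simp [PySem.Chars.splitOn.go, List.isPrefixOf]]
        rw [ih rest [] _ (by simpa using Nat.le_of_succ_le_succ h)]
        simp [splitSp]
        exact (splitSp_cons_headI_tail rest).symm
      · rw [show PySem.Chars.splitOn.go [' '] (fuel+1) (c::rest) cur accL
              = PySem.Chars.splitOn.go [' '] fuel rest (c :: cur) accL by
            simp [PySem.Chars.splitOn.go, List.isPrefixOf, Ne.symm hc]]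
        rw [ih rest (c::cur) accL (by simpa using Nat.le_of_succ_le_succ h)]
        simp only [splitSp, if_neg hc]
        rw [splitSp_cons_headI_tail rest]
        simp

lemma splitOn_eq_splitSp (cs : List Char) :
    PySem.Chars.splitOn cs [' '] = splitSp cs := by
  rw [PySem.Chars.splitOn, go_spec (cs.length+1) cs [] [] (by omega)]
  simp
  exact (splitSp_cons_headI_tail cs).symm

lemma scanTok_false (t : List Char) (d c : Int) :
    scanTok (d, c, false) t = (d, c, false) := by
  induction t with
  | nil => rfl
  | cons i t ih => simpa [scanTok, chkA] using ih

set_option maxRecDepth 8000 in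
lemma lettersA_all_not_digit : (List.all lettersA (fun i => !(List.elem i digitsA))) = true := by
  decide

lemma letters_not_digits : ∀ i ∈ lettersA, i ∉ digitsA := by
  intro i hi hd
  have h := List.all_eq_true.mp lettersA_all_not_digit i hi
  simp [List.elem_eq_contains] at h
  exact h hd

-- trichotomy of A's token scan vs B's counts: either every character of the token
-- is a letter or digit and the counters agree with B's counts, or the scan ends
-- invalid and B's counts fall short of the token length
lemma scanTok_spec (t : List Char) : ∀ d c : Int,
    (scanTok (d, c, true) t
        = (d + (t.countP (· ∈ digitsA) : Int), c + (t.countP (· ∈ lettersA) : Int), true)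
      ∧ (t.countP (· ∈ digitsA) : Int) + (t.countP (· ∈ lettersA) : Int) = (t.length : Int))
    ∨ ((scanTok (d, c, true) t).2.2 = false
      ∧ (t.countP (· ∈ digitsA) : Int) + (t.countP (· ∈ lettersA) : Int) < (t.length : Int)) := by
  induction t with
  | nil => intro d c; left; simp [scanTok]
  | cons i t ih =>
    intro d c
    by_cases hl : i ∈ lettersA
    · have hd : i ∉ digitsA := letters_not_digits i hl
      have hstep : scanTok (d, c, true) (i :: t) = scanTok (d, c + 1, true) t := by
        simp [scanTok, chkA, hl]
      rcases ih d (c + 1) with ⟨h1, h2⟩ | ⟨h1, h2⟩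
      · left
        constructor
        · rw [hstep, h1]; simp [hl, hd, List.countP_cons]; try ring_nf; try omega
        · simp [hl, hd, List.countP_cons]; push_cast; omega
      · right
        constructor
        · rw [hstep]; exact h1
        · simp [hl, hd, List.countP_cons]; push_cast at h2 ⊢; omega
    · by_cases hdg : i ∈ digitsA
      · have hstep : scanTok (d, c, true) (i :: t) = scanTok (d + 1, c, true) t := by
          simp [scanTok, chkA, hl, hdg]
        rcases ih (d + 1) c with ⟨h1, h2⟩ | ⟨h1, h2⟩
        · left
          constructor
          · rw [hstep, h1]; simp [hl, hdg, List.countP_cons]; try ring_nf; try omega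
          · simp [hl, hdg, List.countP_cons]; push_cast; omega
        · right
          constructor
          · rw [hstep]; exact h1
          · simp [hl, hdg, List.countP_cons]; push_cast at h2 ⊢; omega
      · right
        have hstep : scanTok (d, c, true) (i :: t) = (d, c, false) := by
          simp [scanTok, chkA, hl, hdg]
          exact scanTok_false t d c
        constructor
        · rw [hstep]
        · have hle := ih d c
          have hb : (t.countP (· ∈ digitsA) : Int) + (t.countP (· ∈ lettersA) : Int) ≤ (t.length : Int) := by
            rcases hle with ⟨_, h2⟩ | ⟨_, h2⟩ <;> omega
          simp [hl, hdg, List.countP_cons]; push_cast; omega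

lemma gA_eq_stepB (b : Int) (t : List Char) : gA b t = stepB b t := by
  rcases scanTok_spec t 0 0 with ⟨h1, h2⟩ | ⟨h1, h2⟩
  · rw [gA, h1, checkA, stepB]
    simp only [zero_add]
    split_ifs with hA hB hB
    · omega
    · exfalso; revert hA hB; simp; omega
    · exfalso; revert hA hB; simp; omega
    · rfl
  · rw [gA, checkA, stepB]
    split_ifs with hA hB hB
    · exfalso; rcases hA with ⟨_, _, hv⟩; rw [hv] at h1; simp at h1
    · exfalso; rcases hA with ⟨_, _, hv⟩; rw [hv] at h1; simp at h1
    · exfalso; omega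
    · rfl

-- main loop invariant: A's scan over cs equals B's fold over the tokens of cs
lemma main_loop (cs : List Char) : ∀ (st : Int × Int × Bool) (b : Int),
    checkA (cs.foldl stepA (st, b)).1 (cs.foldl stepA (st, b)).2 =
      (splitSp cs).tail.foldl gA (checkA (scanTok st (splitSp cs).headI) b) := by
  induction cs with
  | nil => intro st b; simp [splitSp, scanTok]
  | cons i cs ih =>
    intro st b
    by_cases hi : i = ' '
    · subst hi
      have : List.foldl stepA (st, b) (' ' :: cs)
          = List.foldl stepA ((0, 0, true), checkA st b) cs := by
        simp [stepA]
      rw [this, ih]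
      rw [show splitSp (' ' :: cs) = [] :: splitSp cs from by simp [splitSp]]
      simp only [List.tail_cons, List.headI_cons]
      conv_rhs => rw [splitSp_cons_headI_tail cs]
      rw [List.foldl_cons]
      rfl
    · have : List.foldl stepA (st, b) (i :: cs)
          = List.foldl stepA (chkA st i, b) cs := by
        simp [stepA, hi]
      rw [this, ih]
      simp only [splitSp, if_neg hi]
      conv_rhs => rw [splitSp_cons_headI_tail cs]
      simp only [List.headI_cons, List.tail_cons]
      rfl

-- ===== VERDICT (by name: the statement is the Claim_ definition above) =====
theorem solution_spec : Claim_equal_solution := by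
  intro s _
  have hg : gA = stepB := funext fun b => funext fun t => gA_eq_stepB b t
  show checkA (s.toList.foldl stepA ((0, 0, true), -1)).1
        (s.toList.foldl stepA ((0, 0, true), -1)).2
      = (PySem.Chars.splitOn s.toList " ".toList).foldl stepB (-1)
  rw [show (" ").toList = [' '] from rfl, splitOn_eq_splitSp, main_loop]
  conv_rhs => rw [splitSp_cons_headI_tail s.toList]
  rw [List.foldl_cons, hg, ← gA_eq_stepB]
  rfl
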